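-- pv_equiv track=rewrite | github.com/matthudson1223/spot | src/validators.py | _get_all_word_lengths
-- ===== SOURCE A (Python) =====
-- from typing import Dict, List, Tuple, Set
--
-- def _get_all_word_lengths(grid: List[List[int]]) -> List[int]:
--     """Get lengths of all words in grid"""
--     n = len(grid)
--     if n == 0:
--         return []
--     m = len(grid[0])
--
--     word_lengths = []
--
--     # Across words
--     for i in range(n):
--         j = 0
--         while j < m:
--             if grid[i][j] == 1:
--                 length = 0
--                 while j < m and grid[i][j] == 1:
--                     length += 1
--                     j += 1
--                 if length > 1:  # Don't count single letters
--                     word_lengths.append(length)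
--             else:
--                 j += 1
--
--     # Down words
--     for j in range(m):
--         i = 0
--         while i < n:
--             if grid[i][j] == 1:
--                 length = 0
--                 while i < n and grid[i][j] == 1:
--                     length += 1
--                     i += 1
--                 if length > 1:
--                     word_lengths.append(length)
--             else:
--                 i += 1
--
--     return word_lengths
-- ===== SOURCE B (Python) =====
-- from typing import List
--
--
-- def _line_word_lengths(line):
--     """Word lengths of one line via boundary detection: pair each run start with its run end."""
--     k = len(line)
--     starts = [j for j in range(k) if line[j] == 1 and (j == 0 or line[j - 1] != 1)]
--     ends = [j for j in range(k) if line[j] == 1 and (j == k - 1 or line[j + 1] != 1)]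
--     return [e - s + 1 for s, e in zip(starts, ends) if e > s]
--
--
-- def _get_all_word_lengths(grid: List[List[int]]) -> List[int]:
--     n = len(grid)
--     if n == 0:
--         return []
--     m = len(grid[0])
--     lines = [row[:m] for row in grid] + [[grid[i][j] for i in range(n)] for j in range(m)]
--     out = []
--     for line in lines:
--         out += _line_word_lengths(line)
--     return out
-- ===== Notes on version B (the rewrite author's own statement) =====
-- stated objective: alternative
-- what changed: B finds words by boundary detection: two index comprehensions collect run starts and run ends of each line, which are zipped and subtracted to get lengths, applied to the rows and to explicitly built columns; A instead counts cell by cell with nested while loops that advance a cursor.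
import Mathlib
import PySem

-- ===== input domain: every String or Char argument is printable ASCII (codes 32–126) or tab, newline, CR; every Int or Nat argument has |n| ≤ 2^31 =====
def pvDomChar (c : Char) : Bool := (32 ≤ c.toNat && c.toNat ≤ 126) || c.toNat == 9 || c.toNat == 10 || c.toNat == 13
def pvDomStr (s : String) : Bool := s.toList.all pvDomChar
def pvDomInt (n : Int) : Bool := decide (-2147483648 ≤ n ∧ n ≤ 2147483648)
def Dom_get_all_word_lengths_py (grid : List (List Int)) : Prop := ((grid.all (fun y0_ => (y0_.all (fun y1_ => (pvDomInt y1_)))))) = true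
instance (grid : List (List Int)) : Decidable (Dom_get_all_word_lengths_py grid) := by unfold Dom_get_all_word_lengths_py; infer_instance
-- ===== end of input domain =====

-- B finds words by boundary detection (zip of run-start and run-end index lists per line, over
-- rows and explicitly built columns) instead of A's nested cursor-advancing while loops; same cost.


-- ===== PORT A =====
-- A's inner `while j < m and grid[i][j] == 1: length += 1; j += 1` loop; returns (length, j).
-- `fuel` only makes the recursion structural: called with fuel = limit - j, the exact number of
-- cells left, so it never runs out before the Python loop exits. Indexing is ported with getD 0;
-- the default is only reachable outside Pre_ (where Python raises IndexError).
def pvA_run (get : Nat → Int) (limit : Nat) : Nat → Nat → Nat → Nat × Nat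
  | 0, j, len => (len, j)
  | fuel + 1, j, len =>
    if j < limit then
      if get j = 1 then pvA_run get limit fuel (j + 1) (len + 1) else (len, j)
    else (len, j)

-- A's outer `while j < m` loop (shared shape of the across and the down pass); j strictly
-- increases each iteration, so fuel = limit + 1 at entry is never exhausted first.
def pvA_while (get : Nat → Int) (limit : Nat) : Nat → Nat → List Int → List Int
  | 0, _, acc => acc
  | fuel + 1, j, acc =>
    if j < limit then
      if get j = 1 then
        pvA_while get limit fuel (pvA_run get limit (limit - j) j 0).2
          (if 1 < (pvA_run get limit (limit - j) j 0).1 then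
            acc ++ [((pvA_run get limit (limit - j) j 0).1 : Int)] else acc)
      else pvA_while get limit fuel (j + 1) acc
    else acc

def get_all_word_lengths_py (grid : List (List Int)) : List Int :=
  let n := grid.length
  if n = 0 then []
  else
    let m := (grid.headD []).length
    let acc := (List.range n).foldl
      (fun acc i => pvA_while (fun j => (grid.getD i []).getD j 0) m (m + 1) 0 acc) []
    (List.range m).foldl
      (fun acc j => pvA_while (fun i => (grid.getD i []).getD j 0) n (n + 1) 0 acc) acc

-- ===== PORT B =====
-- Source B's _line_word_lengths: run starts and run ends of one line by two index comprehensions,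
-- zipped and subtracted. Python's short-circuit `or` never reads line[j-1]/line[j+1] out of
-- range; the total `getD _ 0` only differs where that disjunct is already decided.
def pvB_line (line : List Int) : List Int :=
  let k := line.length
  let starts := (List.range k).filter
    (fun j => line.getD j 0 == 1 && (j == 0 || line.getD (j - 1) 0 != 1))
  let ends := (List.range k).filter
    (fun j => line.getD j 0 == 1 && (j == k - 1 || line.getD (j + 1) 0 != 1))
  ((starts.zip ends).filter (fun p => decide (p.1 < p.2))).map
    (fun p => ((p.2 : Int) - (p.1 : Int) + 1))

def get_all_word_lengths_py_alt (grid : List (List Int)) : List Int :=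
  let n := grid.length
  if n = 0 then []
  else
    let m := (grid.headD []).length
    let lines := grid.map (fun row => row.take m) ++
      (List.range m).map (fun j => (List.range n).map (fun i => (grid.getD i []).getD j 0))
    lines.foldl (fun out line => out ++ pvB_line line) []

-- ===== PRECONDITION & SPEC =====
-- Pre_ is exactly A's return domain: A RAISES IndexError as soon as some row is shorter than
-- the first row (it reads every cell grid[i][j] with j < len(grid[0])); nothing A returns on
-- is excluded.
def Pre_get_all_word_lengths_py (grid : List (List Int)) : Prop :=
  ∀ r ∈ grid, (grid.headD []).length ≤ r.length
instance (grid : List (List Int)) : Decidable (Pre_get_all_word_lengths_py grid) := by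
  unfold Pre_get_all_word_lengths_py; infer_instance

def pvWitness_get_all_word_lengths_py : List (List Int) := [[1, 1, 0], [0, 1, 1]]

def Spec_get_all_word_lengths_py (grid : List (List Int)) (out : List Int) : Prop := out = get_all_word_lengths_py_alt grid
instance (grid : List (List Int)) (out : List Int) : Decidable (Spec_get_all_word_lengths_py grid out) := by unfold Spec_get_all_word_lengths_py; infer_instance

-- ===== CLAIM (what is proved, stated in full; the proofs are below) =====
def Claim_equal_get_all_word_lengths_py : Prop := ∀ (grid : List (List Int)), Dom_get_all_word_lengths_py grid → Pre_get_all_word_lengths_py grid → Spec_get_all_word_lengths_py grid (get_all_word_lengths_py grid)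

-- ===== LEMMAS AND PROOFS =====

theorem pvA_run_snd_ge (get : Nat → Int) (limit : Nat) :
    ∀ f j len, j ≤ (pvA_run get limit f j len).2 := by
  intro f
  induction f with
  | zero => intro j len; simp [pvA_run]
  | succ f ih =>
    intro j len
    simp only [pvA_run]
    split
    · split
      · exact le_trans (by omega) (ih (j + 1) (len + 1))
      · simp
    · simp

theorem pvA_run_exit (get : Nat → Int) (limit : Nat) (f j len : Nat) (h : ¬ j < limit) :
    pvA_run get limit f j len = (len, j) := by
  cases f <;> simp [pvA_run, h]

-- with fuel = limit - j the fueled run computes exactly one step of the Python inner while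
theorem pvA_run_unfold (get : Nat → Int) (limit j len : Nat) (h : j < limit) :
    pvA_run get limit (limit - j) j len =
      if get j = 1 then pvA_run get limit (limit - (j + 1)) (j + 1) (len + 1) else (len, j) := by
  have hd : limit - j = (limit - (j + 1)) + 1 := by omega
  rw [hd]
  simp [pvA_run, h]

theorem pvA_run_snd_gt (get : Nat → Int) (limit j len : Nat) (h : j < limit) (hg : get j = 1) :
    j + 1 ≤ (pvA_run get limit (limit - j) j len).2 := by
  rw [pvA_run_unfold get limit j len h, if_pos hg]
  exact pvA_run_snd_ge get limit _ (j + 1) (len + 1)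

-- any two sufficient fuels compute the same while-loop value
theorem pvA_while_fuel (get : Nat → Int) (limit : Nat) :
    ∀ f g j acc, limit - j < f → limit - j < g →
      pvA_while get limit f j acc = pvA_while get limit g j acc := by
  intro f
  induction f with
  | zero => intro g j acc hf _; omega
  | succ f ih =>
    intro g j acc hf hg
    cases g with
    | zero => omega
    | succ g =>
      simp only [pvA_while]
      by_cases h : j < limit
      · simp only [if_pos h]
        by_cases h1 : get j = 1
        · simp only [if_pos h1]
          have hge := pvA_run_snd_gt get limit j 0 h h1
          exact ih g _ _ (by omega) (by omega)
        · simp only [if_neg h1]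
          exact ih g _ _ (by omega) (by omega)
      · simp [h]

-- A's inner while from a 1-cell computes the full run: length L, landing position j + L,
-- all cells of [j, j+L) are 1, and the run ends at the border or at a non-1 cell
theorem pvA_run_char (get : Nat → Int) (limit : Nat) :
    ∀ d j len, j < limit → get j = 1 → limit - j = d →
      ∃ L, 1 ≤ L ∧ pvA_run get limit d j len = (len + L, j + L) ∧
        (∀ p, j ≤ p → p < j + L → get p = 1) ∧ j + L ≤ limit ∧
        (j + L = limit ∨ get (j + L) ≠ 1) := by
  intro d
  induction d with
  | zero => intro j len hj _ hd; omega
  | succ d ih =>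
    intro j len hj hg hd
    have hr : pvA_run get limit (d + 1) j len = pvA_run get limit d (j + 1) (len + 1) := by
      have := pvA_run_unfold get limit j len hj
      rw [hd] at this
      rw [this, if_pos hg]
      congr 1
      omega
    by_cases hj1 : j + 1 < limit
    · by_cases hg1 : get (j + 1) = 1
      · obtain ⟨L, hL1, hrun, hall, hle, hend⟩ := ih (j + 1) (len + 1) hj1 hg1 (by omega)
        refine ⟨L + 1, by omega, ?_, ?_, by omega, ?_⟩
        · rw [hr, hrun]
          simp only [Prod.mk.injEq]
          omega
        · intro p hp1 hp2
          by_cases hpj : p = j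
          · subst hpj; exact hg
          · exact hall p (by omega) (by omega)
        · rcases hend with h | h
          · left; omega
          · right; have : j + (L + 1) = j + 1 + L := by omega
            rw [this]; exact h
      · refine ⟨1, le_refl 1, ?_, ?_, by omega, by right; simpa using hg1⟩
        · rw [hr]
          have := pvA_run_unfold get limit (j + 1) (len + 1) hj1
          have hdd : limit - (j + 1) = d := by omega
          rw [hdd] at this
          rw [this, if_neg hg1]
        · intro p hp1 hp2
          have : p = j := by omega
          subst this; exact hg
    · refine ⟨1, le_refl 1, ?_, ?_, by omega, by left; omega⟩
      · rw [hr, pvA_run_exit get limit d (j + 1) (len + 1) hj1]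
      · intro p hp1 hp2
        have : p = j := by omega
        subst this; exact hg
  
-- A's outer while from position j = B's boundary zip over the index suffix [j, limit)
theorem whileZip (get : Nat → Int) (limit : Nat) :
    ∀ d j acc, limit - j = d → (j < limit → get j = 1 → (j = 0 ∨ get (j - 1) ≠ 1)) →
      pvA_while get limit (d + 1) j acc =
        acc ++ (((((List.range' j d).filter
            (fun p => get p == 1 && (p == 0 || get (p - 1) != 1))).zip
          ((List.range' j d).filter
            (fun p => get p == 1 && (p == limit - 1 || get (p + 1) != 1)))).filter
          (fun p => decide (p.1 < p.2))).map (fun p => ((p.2 : Int) - (p.1 : Int) + 1))) := by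
  intro d
  induction d using Nat.strong_induction_on with
  | _ d ih =>
    intro j acc hd hinv
    by_cases hj : j < limit
    · by_cases hg : get j = 1
      · obtain ⟨L, hL1, hrun, hall, hle, hend⟩ :=
          pvA_run_char get limit d j 0 hj hg hd
        have hdL : d = L + (limit - (j + L)) := by omega
        set d' := limit - (j + L) with hd'
        -- one unfolding of the outer while
        have hstep : pvA_while get limit (d + 1) j acc =
            pvA_while get limit d (j + L)
              (if 1 < L then acc ++ [(L : Int)] else acc) := by
          simp only [pvA_while, if_pos hj, if_pos hg, hd, hrun, Nat.zero_add]
        have hfuel : pvA_while get limit d (j + L)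
              (if 1 < L then acc ++ [(L : Int)] else acc) =
            pvA_while get limit (d' + 1) (j + L)
              (if 1 < L then acc ++ [(L : Int)] else acc) :=
          pvA_while_fuel get limit d (d' + 1) (j + L) _ (by omega) (by omega)
        have hih := ih d' (by omega) (j + L)
          (if 1 < L then acc ++ [(L : Int)] else acc) rfl
          (by
            intro h1 h2
            rcases hend with h | h
            · omega
            · exact absurd h2 h)
        -- split the index range at the end of the run
        have hsplit : List.range' j d = List.range' j L ++ List.range' (j + L) d' := by
          have h2 := List.range'_append (s := j) (m := L) (n := d') (step := 1)
          have h3 : j + 1 * L = j + L := by omega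
          rw [h3] at h2
          rw [hdL, ← h2]
        -- the run segment contains exactly one start (j) and one end (j + L - 1)
        have hS : (List.range' j L).filter
            (fun p => get p == 1 && (p == 0 || get (p - 1) != 1)) = [j] := by
          have hL : L = (L - 1) + 1 := by omega
          rw [hL, List.range'_succ]
          have h1 : (get j == 1 && (j == 0 || get (j - 1) != 1)) = true := by
            rcases hinv hj hg with h | h
            · subst h; simp [hg]
            · simp [hg, h]
          rw [List.filter_cons_of_pos
            (p := fun p => get p == 1 && (p == 0 || get (p - 1) != 1)) h1,
            List.filter_eq_nil_iff.mpr ?_]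
          intro p hp
          rw [List.mem_range'_1] at hp
          have hp1 : get (p - 1) = 1 := hall (p - 1) (by omega) (by omega)
          simp [hp1]
          omega
        have hE : (List.range' j L).filter
            (fun p => get p == 1 && (p == limit - 1 || get (p + 1) != 1)) = [j + L - 1] := by
          have hL : L = (L - 1) + 1 := by omega
          have hsplit2 : List.range' j L = List.range' j (L - 1) ++ [j + L - 1] := by
            have h2 := List.range'_concat (s := j) (n := L - 1) (step := 1)
            have h3 : j + 1 * (L - 1) = j + L - 1 := by omega
            rw [h3] at h2
            conv_lhs => rw [hL]
            exact h2
          rw [hsplit2, List.filter_append]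
          rw [List.filter_eq_nil_iff.mpr ?_, List.filter_cons_of_pos
            (p := fun p => get p == 1 && (p == limit - 1 || get (p + 1) != 1)) ?_]
          · simp
          · show (get (j + L - 1) == 1 &&
              ((j + L - 1) == limit - 1 || get (j + L - 1 + 1) != 1)) = true
            have hgl : get (j + L - 1) = 1 := hall (j + L - 1) (by omega) (by omega)
            rcases hend with h | h
            · simp [hgl]
              left
              omega
            · simp [hgl]
              right
              have heq : j + L - 1 + 1 = j + L := by omega
              rw [heq]
              exact h
          · intro p hp
            rw [List.mem_range'_1] at hp
            have hp1 : get (p + 1) = 1 := hall (p + 1) (by omega) (by omega)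
            simp [hp1]
            omega
        rw [hstep, hfuel, hih, hsplit]
        rw [List.filter_append, List.filter_append, hS, hE]
        rw [List.singleton_append, List.singleton_append, List.zip_cons_cons]
        by_cases hL2 : 1 < L
        · rw [List.filter_cons_of_pos (p := fun p : Nat × Nat => decide (p.1 < p.2))
            (by simp; omega), List.map_cons, if_pos hL2]
          have hv : ((j + L - 1 : Nat) : Int) - (j : Nat) + 1 = (L : Int) := by
            have : ((j + L - 1 : Nat) : Int) = (j : Int) + (L : Int) - 1 := by
              push_cast [Nat.cast_sub (by omega : 1 ≤ j + L)]; ring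
            rw [this]; ring
          rw [hv, List.append_assoc]
          rfl
        · rw [List.filter_cons_of_neg (p := fun p : Nat × Nat => decide (p.1 < p.2))
            (by simp; omega), if_neg hL2]
      · -- non-1 cell: both sides skip index j
        have hd1 : d = (d - 1) + 1 := by omega
        have hstep : pvA_while get limit (d + 1) j acc =
            pvA_while get limit ((d - 1) + 1) (j + 1) acc := by
          conv_lhs => rw [pvA_while]
          rw [if_pos hj, if_neg hg, ← hd1]
        rw [hstep, ih (d - 1) (by omega) (j + 1) acc (by omega)
          (by intro _ _; right; simpa using hg)]
        have hr : List.range' j d = j :: List.range' (j + 1) (d - 1) := by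
          conv_lhs => rw [hd1]
          rw [List.range'_succ]
        rw [hr,
          List.filter_cons_of_neg (p := fun p => get p == 1 && (p == 0 || get (p - 1) != 1))
            (by simp [hg]),
          List.filter_cons_of_neg
            (p := fun p => get p == 1 && (p == limit - 1 || get (p + 1) != 1))
            (by simp [hg])]
    · have hd0 : d = 0 := by omega
      subst hd0
      simp [pvA_while, hj]

theorem getD_map_range (get : Nat → Int) (limit j : Nat) (h : j < limit) :
    ((List.range limit).map get).getD j 0 = get j := by
  rw [List.getD_eq_getElem _ 0 (by simpa using h)]
  simp

-- A's per-line while-scan = append B's boundary lengths of the materialised line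
theorem lineEquiv (get : Nat → Int) (limit : Nat) (acc : List Int) :
    pvA_while get limit (limit + 1) 0 acc = acc ++ pvB_line ((List.range limit).map get) := by
  have h := whileZip get limit limit 0 acc (by omega) (by intro _ _; left; rfl)
  rw [← List.range_eq_range'] at h
  rw [h]
  congr 1
  simp only [pvB_line, List.length_map, List.length_range]
  have hs : (List.range limit).filter
      (fun j => ((List.range limit).map get).getD j 0 == 1 &&
        (j == 0 || ((List.range limit).map get).getD (j - 1) 0 != 1)) =
      (List.range limit).filter (fun j => get j == 1 && (j == 0 || get (j - 1) != 1)) := by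
    apply List.filter_congr
    intro j hj
    rw [List.mem_range] at hj
    rw [getD_map_range get limit j hj]
    by_cases h0 : j = 0
    · simp [h0]
    · rw [getD_map_range get limit (j - 1) (by omega)]
  have he : (List.range limit).filter
      (fun j => ((List.range limit).map get).getD j 0 == 1 &&
        (j == limit - 1 || ((List.range limit).map get).getD (j + 1) 0 != 1)) =
      (List.range limit).filter
        (fun j => get j == 1 && (j == limit - 1 || get (j + 1) != 1)) := by
    apply List.filter_congr
    intro j hj
    rw [List.mem_range] at hj
    rw [getD_map_range get limit j hj]
    by_cases hl : j = limit - 1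
    · simp [hl]
    · rw [getD_map_range get limit (j + 1) (by omega)]
  rw [hs, he]

theorem map_range_getD {α : Type} (xs : List α) (d : α) :
    (List.range xs.length).map (fun i => xs.getD i d) = xs := by
  induction xs with
  | nil => simp
  | cons x t ih =>
    rw [List.length_cons, List.range_succ_eq_map]
    simp only [List.map_cons, List.map_map]
    refine congrArg₂ _ rfl ?_
    simpa [Function.comp_def] using ih

theorem foldl_range_getD {α β : Type} (xs : List α) (d : α) (g : β → α → β) (init : β) :
    (List.range xs.length).foldl (fun acc i => g acc (xs.getD i d)) init = xs.foldl g init := by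
  have := List.foldl_map (f := fun i => xs.getD i d) (g := g)
    (l := List.range xs.length) (init := init)
  rw [← this, map_range_getD]

theorem map_range_getD_take (xs : List Int) (m : Nat) (h : m ≤ xs.length) :
    (List.range m).map (fun i => xs.getD i 0) = xs.take m := by
  apply List.ext_getElem
  · simp [Nat.min_eq_left h]
  · intro i hi _
    simp only [List.getElem_map, List.getElem_range, List.getElem_take]
    rw [List.getD_eq_getElem xs 0 (by simp at hi; omega)]

theorem main_equiv (grid : List (List Int))
    (hpre : ∀ r ∈ grid, (grid.headD []).length ≤ r.length) :
    get_all_word_lengths_py grid = get_all_word_lengths_py_alt grid := by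
  by_cases hne : grid = []
  · subst hne
    simp [get_all_word_lengths_py, get_all_word_lengths_py_alt]
  · have hn : grid.length ≠ 0 := by simpa using hne
    set m := (grid.headD []).length with hm
    have hacross : (List.range grid.length).foldl
        (fun acc i => pvA_while (fun j => (grid.getD i []).getD j 0) m (m + 1) 0 acc) [] =
        (grid.map (fun row => row.take m)).foldl (fun out line => out ++ pvB_line line) [] := by
      rw [PySem.List.foldl_congr_mem
        (g := fun acc i => acc ++ pvB_line ((grid.getD i []).take m))]
      · rw [foldl_range_getD grid [] (fun acc r => acc ++ pvB_line (r.take m)) []]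
        rw [List.foldl_map]
      · intro acc i hi
        rw [lineEquiv]
        have hilt : i < grid.length := List.mem_range.mp hi
        have hmem : grid.getD i [] ∈ grid := by
          rw [List.getD_eq_getElem grid [] hilt]; exact List.getElem_mem hilt
        rw [map_range_getD_take _ m (hpre _ hmem)]
    have hdown : ∀ start : List Int, (List.range m).foldl
        (fun acc j => pvA_while (fun i => (grid.getD i []).getD j 0)
          grid.length (grid.length + 1) 0 acc) start =
        ((List.range m).map
          (fun j => (List.range grid.length).map (fun i => (grid.getD i []).getD j 0))).foldl
          (fun out line => out ++ pvB_line line) start := by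
      intro start
      rw [List.foldl_map]
      apply PySem.List.foldl_congr_mem
      intro acc j _
      rw [lineEquiv]
    show (if grid.length = 0 then [] else _) = _
    rw [if_neg hn]
    simp only [get_all_word_lengths_py_alt, if_neg hn]
    rw [List.foldl_append, hacross, hdown]

-- ===== VERDICT (by name: the statement is the Claim_ definition above) =====
theorem get_all_word_lengths_py_spec : Claim_equal_get_all_word_lengths_py := by
  intro grid _ hpre
  exact main_equiv grid hpre
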